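-- pv_equiv track=rewrite | github.com/Andrew-Mereuta/Router-Vulnerabilities-Identification | probing/udp_probes.py | analyze_ipid_sequence
-- ===== SOURCE A (Python) =====
-- def analyze_ipid_sequence(ipids):
--     """
--     Analyzes the sequence of IPID values to determine if they are incremental, random, static, zero, or contain duplicates.
--     """
--     if not ipids:
--         return "No ICMP port unreachable responses captured."
--
--     analysis_result = "Analysis Result: "
--     if all(ipid == 0 for ipid in ipids):
--         analysis_result += "Zero"
--     elif all(ipid == ipids[0] for ipid in ipids):
--         analysis_result += "Static"
--     elif len(set(ipids)) == len(ipids):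
--         analysis_result += "Random or Incremental"
--     else:
--         analysis_result += "Duplicate"
--
--     return analysis_result
-- ===== SOURCE B (Python) =====
-- def analyze_ipid_sequence(ipids):
--     """
--     Analyzes the sequence of IPID values to determine if they are incremental, random, static, zero, or contain duplicates.
--     """
--     if not ipids:
--         return "No ICMP port unreachable responses captured."
--     s = sorted(ipids)
--     if s[0] == s[-1]:
--         tag = "Zero" if s[0] == 0 else "Static"
--     elif any(x == y for x, y in zip(s, s[1:])):
--         tag = "Duplicate"
--     else:
--         tag = "Random or Incremental"
--     return "Analysis Result: " + tag
-- ===== Notes on version B (the rewrite author's own statement) =====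
-- stated objective: alternative
-- what changed: Sorts the list once and classifies from the sorted order alone (first==last means constant, an equal adjacent pair means duplicate, otherwise all distinct), instead of A's all()-scans plus a set-cardinality test.
import Mathlib
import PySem

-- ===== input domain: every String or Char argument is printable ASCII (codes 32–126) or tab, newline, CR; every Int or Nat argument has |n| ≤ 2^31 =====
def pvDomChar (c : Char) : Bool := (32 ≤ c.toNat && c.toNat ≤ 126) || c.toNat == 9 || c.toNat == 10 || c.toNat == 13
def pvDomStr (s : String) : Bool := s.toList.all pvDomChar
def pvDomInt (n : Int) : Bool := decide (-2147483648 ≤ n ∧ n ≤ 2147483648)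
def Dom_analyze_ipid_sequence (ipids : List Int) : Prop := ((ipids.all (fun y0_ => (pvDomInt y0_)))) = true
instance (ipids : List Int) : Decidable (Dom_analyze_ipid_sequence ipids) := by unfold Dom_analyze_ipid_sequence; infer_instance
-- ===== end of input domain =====

-- B sorts the list once and classifies from the sorted order alone (first==last => Zero/Static,
-- an equal adjacent pair => Duplicate, else Random or Incremental); objective: alternative algorithm.


-- ===== PORT A =====
def analyze_ipid_sequence (ipids : List Int) : String :=
  if ipids = [] then "No ICMP port unreachable responses captured."
  else
    let analysis_result := "Analysis Result: "
    if ipids.all (fun ipid => ipid == 0) then analysis_result ++ "Zero"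
    else if ipids.all (fun ipid => ipid == ipids.headI) then analysis_result ++ "Static"
    else if PySem.Set.len (PySem.Set.ofList ipids) = (ipids.length : Int) then
      analysis_result ++ "Random or Incremental"
    else analysis_result ++ "Duplicate"

-- ===== PORT B =====
def analyze_ipid_sequence_alt (ipids : List Int) : String :=
  if ipids = [] then "No ICMP port unreachable responses captured."
  else
    let s := PySem.List.sorted ipids (fun x => x) false
    let tag :=
      if s.headI == s.getLastI then          -- s[0] == s[-1] (s is nonempty here)
        if s.headI == 0 then "Zero" else "Static"
      else if (s.zip s.tail).any (fun p => p.1 == p.2) then "Duplicate"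
      else "Random or Incremental"
    "Analysis Result: " ++ tag

-- ===== PRECONDITION & SPEC =====
def Spec_analyze_ipid_sequence (ipids : List Int) (out : String) : Prop := out = analyze_ipid_sequence_alt ipids
instance (ipids : List Int) (out : String) : Decidable (Spec_analyze_ipid_sequence ipids out) := by unfold Spec_analyze_ipid_sequence; infer_instance

-- ===== CLAIM (what is proved, stated in full; the proofs are below) =====
def Claim_equal_analyze_ipid_sequence : Prop := ∀ (ipids : List Int), Dom_analyze_ipid_sequence ipids → Spec_analyze_ipid_sequence ipids (analyze_ipid_sequence ipids)

-- ===== LEMMAS AND PROOFS =====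

-- the head of a nonempty list is a member
theorem pv_headI_mem {l : List Int} (h : l ≠ []) : l.headI ∈ l := by
  cases l with
  | nil => exact absurd rfl h
  | cons a t => simp

-- getLastI skips the head of a two-or-more list
theorem pv_getLastI_cons_cons (a b : Int) (r : List Int) :
    (a :: b :: r).getLastI = (b :: r).getLastI := by
  simp [List.getLastI_eq_getLast?_getD, List.getLast?_cons_cons]

-- the last element of a nonempty list is a member
theorem pv_getLastI_mem {l : List Int} (h : l ≠ []) : l.getLastI ∈ l := by
  induction l with
  | nil => exact absurd rfl h
  | cons a t ih =>
    cases t with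
    | nil => simp [List.getLastI]
    | cons b r =>
      have h1 : (b :: r).getLastI ∈ b :: r := ih (by simp)
      have h2 := pv_getLastI_cons_cons a b r
      rw [h2]; exact List.mem_cons_of_mem a h1

-- a ≤-sorted list is bounded below by its head
theorem pv_headI_le {l : List Int} (hp : l.Pairwise (· ≤ ·)) : ∀ x ∈ l, l.headI ≤ x := by
  cases l with
  | nil => intro x hx; cases hx
  | cons a t =>
    intro x hx
    rcases List.mem_cons.1 hx with h | h
    · simp [h]
    · exact (List.pairwise_cons.1 hp).1 x h

-- a ≤-sorted list is bounded above by its last element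
theorem pv_le_getLastI {l : List Int} (hp : l.Pairwise (· ≤ ·)) : ∀ x ∈ l, x ≤ l.getLastI := by
  induction l with
  | nil => intro x hx; cases hx
  | cons a t ih =>
    intro x hx
    obtain ⟨ha, hpt⟩ := List.pairwise_cons.1 hp
    cases t with
    | nil => simp at hx; simp [hx, List.getLastI]
    | cons b r =>
      have hlast : (b :: r).getLastI ∈ b :: r := pv_getLastI_mem (by simp)
      have hgl := pv_getLastI_cons_cons a b r
      rcases List.mem_cons.1 hx with h | h
      · rw [h] at *; rw [hgl]; exact ha _ hlast
      · rw [hgl]; exact ih hpt x h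

-- a <-sorted list has no equal adjacent pair
theorem pv_no_adj_of_lt {l : List Int} (hp : l.Pairwise (· < ·)) :
    (l.zip l.tail).any (fun p => p.1 == p.2) = false := by
  induction l with
  | nil => rfl
  | cons a t ih =>
    cases t with
    | nil => rfl
    | cons b r =>
      obtain ⟨ha, hpt⟩ := List.pairwise_cons.1 hp
      have hab : a ≠ b := ne_of_lt (ha b (by simp))
      have hrest := ih hpt
      simp only [List.tail_cons] at hrest
      simp only [List.zip_cons_cons, List.tail_cons, List.any_cons, hrest]
      simp [hab]

-- a ≤-sorted list with a duplicate has an equal adjacent pair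
theorem pv_adj_of_dup {l : List Int} (hp : l.Pairwise (· ≤ ·)) (hd : ¬ l.Nodup) :
    (l.zip l.tail).any (fun p => p.1 == p.2) = true := by
  induction l with
  | nil => exact absurd List.nodup_nil hd
  | cons a t ih =>
    obtain ⟨ha, hpt⟩ := List.pairwise_cons.1 hp
    by_cases hat : a ∈ t
    · cases t with
      | nil => cases hat
      | cons b r =>
        have hab : a = b := by
          rcases List.mem_cons.1 hat with h | h
          · exact h
          · have h1 : a ≤ b := ha b (by simp)
            have h2 : b ≤ a := (List.pairwise_cons.1 hpt).1 a h
            omega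
        simp only [List.tail_cons, List.zip_cons_cons, List.any_cons]
        simp [hab]
    · have hdt : ¬ t.Nodup := by
        intro hnt
        exact hd (List.nodup_cons.2 ⟨hat, hnt⟩)
      have hrest := ih hpt hdt
      cases t with
      | nil => exact absurd List.nodup_nil hdt
      | cons b r =>
        simp only [List.tail_cons] at hrest
        simp only [List.zip_cons_cons, List.tail_cons, List.any_cons, hrest]
        simp

-- set(xs) has as many elements as xs iff xs has no duplicates
theorem pv_set_len_iff {xs : List Int} :
    (PySem.Set.len (PySem.Set.ofList xs) = (xs.length : Int)) ↔ xs.Nodup := by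
  constructor
  · intro h
    have hlen : (PySem.Set.ofList xs).length = xs.length := by
      have h' := h; simp only [PySem.Set.len] at h'; exact_mod_cast h'
    have hn : (PySem.Set.ofList xs).Nodup := PySem.Set.nodup_ofList xs
    have hfs : (PySem.Set.ofList xs).toFinset = xs.toFinset := by
      ext y
      simp only [List.mem_toFinset]
      exact PySem.Set.mem_ofList xs y
    have hded : xs.dedup.length = xs.length := by
      have c1 : (PySem.Set.ofList xs).toFinset.card = (PySem.Set.ofList xs).length :=
        List.toFinset_card_of_nodup hn
      have c2 : xs.toFinset.card = xs.dedup.length := List.card_toFinset xs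
      rw [hfs] at c1
      omega
    have hsub : xs.dedup.Sublist xs := List.dedup_sublist xs
    exact List.dedup_eq_self.1 (hsub.eq_of_length hded)
  · intro h
    have := PySem.Set.ofList_eq_self_of_nodup xs h
    simp [PySem.Set.len, this]

-- ===== VERDICT (by name: the statement is the Claim_ definition above) =====
theorem analyze_ipid_sequence_spec : Claim_equal_analyze_ipid_sequence := by
  intro ipids _
  unfold Spec_analyze_ipid_sequence analyze_ipid_sequence analyze_ipid_sequence_alt
  by_cases hne : ipids = []
  · simp [hne]
  · simp only [if_neg hne]
    set s := PySem.List.sorted ipids (fun x => x) false with hs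
    have hsne : s ≠ [] := by
      rw [hs]; intro h
      exact hne ((PySem.List.sorted_eq_nil_iff _ _ _).1 h)
    have hperm : s.Perm ipids := PySem.List.sorted_perm ipids (fun x => x) false
    have hmem : ∀ x, x ∈ s ↔ x ∈ ipids := fun x => hperm.mem_iff
    have hpw : s.Pairwise (fun a b => a ≤ b) := PySem.List.sorted_pairwise ipids (fun x => x)
    have hheadm : s.headI ∈ ipids := (hmem _).1 (pv_headI_mem hsne)
    have hlastm : s.getLastI ∈ ipids := (hmem _).1 (pv_getLastI_mem hsne)
    by_cases h0 : ipids.all (fun ipid => ipid == 0)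
    · -- all zero
      have hall : ∀ y ∈ ipids, y = (0 : Int) := by simpa using h0
      have hh : s.headI = 0 := hall _ hheadm
      have hl : s.getLastI = 0 := hall _ hlastm
      simp [h0, hh, hl]
    · simp only [if_neg h0]
      by_cases h1 : ipids.all (fun ipid => ipid == ipids.headI)
      · -- static: all equal to ipids[0], which is nonzero (else the Zero branch fired)
        have hall : ∀ y ∈ ipids, y = ipids.headI := by simpa using h1
        have hc0 : ipids.headI ≠ 0 := by
          intro h
          apply h0
          simp only [List.all_eq_true]
          intro y hy
          simp [hall y hy, h]
        have hh : s.headI = ipids.headI := hall _ hheadm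
        have hl : s.getLastI = ipids.headI := hall _ hlastm
        simp [h1, hh, hl, hc0]
      · -- not constant: s[0] ≠ s[-1]
        simp only [if_neg h1]
        have hne2 : s.headI ≠ s.getLastI := by
          intro heq
          apply h1
          simp only [List.all_eq_true]
          have hallc : ∀ x ∈ ipids, x = s.headI := by
            intro x hx
            have h1' : s.headI ≤ x := pv_headI_le hpw x ((hmem x).2 hx)
            have h2' : x ≤ s.getLastI := pv_le_getLastI hpw x ((hmem x).2 hx)
            omega
          intro y hy
          have hy' := hallc y hy
          have hh' := hallc ipids.headI (pv_headI_mem hne)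
          simp [hy', hh']
        by_cases hset : PySem.Set.len (PySem.Set.ofList ipids) = (ipids.length : Int)
        · -- all distinct
          have hnd : s.Nodup := (hperm.nodup_iff).2 (pv_set_len_iff.1 hset)
          have hlt : s.Pairwise (fun a b => a < b) := by
            have h' := List.Pairwise.and hpw hnd
            exact h'.imp (fun h => lt_of_le_of_ne h.1 h.2)
          have hadj := pv_no_adj_of_lt hlt
          rw [if_pos hset]
          simp [hne2, hadj]
        · -- duplicates
          have hnd : ¬ s.Nodup := by
            intro h
            exact hset (pv_set_len_iff.2 ((hperm.nodup_iff).1 h))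
          have hadj := pv_adj_of_dup hpw hnd
          rw [if_neg hset]
          simp [hne2, hadj]
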